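-- pv_equiv track=rewrite | github.com/Kiselaw/Advent-of-Code | 2024/7/python_7.2.py | check_concat
-- ===== SOURCE A (Python) =====
-- def check_concat(curr_num, target) -> bool:
--     while curr_num != 0:
--         if curr_num % 10 == target % 10:
--             curr_num //= 10
--             target //= 10
--             continue
--         else:
--             return False
--     return True
-- ===== SOURCE B (Python) =====
-- def check_concat(curr_num, target) -> bool:
--     m = 1
--     while m <= curr_num:
--         m *= 10
--     return target % m == curr_num
-- ===== Notes on version B (the rewrite author's own statement) =====
-- stated objective: simpler
-- what changed: Replaces the digit-by-digit matching loop on both numbers with computing m = the smallest power of 10 exceeding curr_num and a single modular test target % m == curr_num.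
-- outside the precondition, e.g. on check_concat(-3, 12): A returns False, B returns False; on check_concat(-1, -1): A does not finish within the time limit, B returns False
import Mathlib
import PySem

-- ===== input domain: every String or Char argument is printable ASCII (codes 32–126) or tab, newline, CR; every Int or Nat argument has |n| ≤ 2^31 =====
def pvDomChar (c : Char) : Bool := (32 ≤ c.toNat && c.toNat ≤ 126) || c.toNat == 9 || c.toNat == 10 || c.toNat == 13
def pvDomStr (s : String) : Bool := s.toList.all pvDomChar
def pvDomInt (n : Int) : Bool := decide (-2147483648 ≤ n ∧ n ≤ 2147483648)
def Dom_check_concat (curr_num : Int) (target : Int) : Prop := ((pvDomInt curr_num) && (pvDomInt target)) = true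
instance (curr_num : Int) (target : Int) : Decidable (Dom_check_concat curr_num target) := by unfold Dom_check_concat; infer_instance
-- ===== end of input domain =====

-- B replaces A's digit-by-digit matching loop with one modular test against the
-- smallest power of 10 exceeding curr_num (objective: simpler).

-- ===== PORT A =====
-- A's while loop, step for step; the fuel argument only makes it total
-- (curr_num.natAbs + 1 iterations always suffice when curr_num ≥ 0; for
-- curr_num < 0 the Python loop can diverge, which Pre_ excludes).
def check_concat_loop : Nat → Int → Int → Bool
  | 0, _, _ => false
  | fuel + 1, curr_num, target =>
    if curr_num ≠ 0 then
      if PySem.Int.mod curr_num 10 = PySem.Int.mod target 10 then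
        check_concat_loop fuel (PySem.Int.floordiv curr_num 10) (PySem.Int.floordiv target 10)
      else false
    else true

def check_concat (curr_num : Int) (target : Int) : Bool :=
  check_concat_loop (curr_num.natAbs + 1) curr_num target

-- ===== PORT B =====
-- Source B's while loop: m = 1; while m <= curr_num: m *= 10.  The positivity
-- argument hm only justifies termination.
def altLoop (curr : Int) (m : Int) (hm : 0 < m) : Int :=
  if m ≤ curr then altLoop curr (m * 10) (by omega) else m
termination_by (curr + 1 - m).toNat
decreasing_by omega

def check_concat_alt (curr_num : Int) (target : Int) : Bool :=
  decide (PySem.Int.mod target (altLoop curr_num 1 (by omega)) = curr_num)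

-- ===== PRECONDITION & SPEC =====
-- Pre_ excludes negative curr_num: there A's loop can diverge (curr_num //= 10
-- stalls at -1), and wherever it does return (a digit mismatch) both programs
-- return False anyway.
def Pre_check_concat (curr_num : Int) (target : Int) : Prop := 0 ≤ curr_num
instance (curr_num : Int) (target : Int) : Decidable (Pre_check_concat curr_num target) := by unfold Pre_check_concat; infer_instance
def pvWitness_check_concat : Int × Int := (12, 3412)

def Spec_check_concat (curr_num : Int) (target : Int) (out : Bool) : Prop := out = check_concat_alt curr_num target
instance (curr_num : Int) (target : Int) (out : Bool) : Decidable (Spec_check_concat curr_num target out) := by unfold Spec_check_concat; infer_instance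

-- ===== CLAIM (what is proved, stated in full; the proofs are below) =====
def Claim_equal_check_concat : Prop := ∀ (curr_num : Int) (target : Int), Dom_check_concat curr_num target → Pre_check_concat curr_num target → Spec_check_concat curr_num target (check_concat curr_num target)

-- ===== LEMMAS AND PROOFS =====

theorem altLoop_unfold (curr m : Int) (hm : 0 < m) :
    altLoop curr m hm = if m ≤ curr then altLoop curr (m * 10) (by omega) else m := by
  rw [altLoop]

-- the result is positive and exceeds curr
theorem altLoop_pos (curr : Int) : ∀ (m : Int) (hm : 0 < m),
    0 < altLoop curr m hm ∧ curr < altLoop curr m hm := by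
  refine altLoop.induct curr (fun m hm => 0 < altLoop curr m hm ∧ curr < altLoop curr m hm) ?_ ?_
  · intro m hm h ih
    rw [altLoop_unfold, if_pos h]; exact ih
  · intro m hm h
    rw [altLoop_unfold, if_neg h]; omega

-- scaling: multiplying the start by 10 corresponds to dividing curr by 10
theorem altLoop_scale (curr : Int) : ∀ (m : Int) (hm : 0 < m),
    altLoop curr (m * 10) (by omega) = 10 * altLoop (curr / 10) m hm := by
  refine altLoop.induct (curr / 10)
    (fun m hm => altLoop curr (m * 10) (by omega) = 10 * altLoop (curr / 10) m hm) ?_ ?_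
  · intro m hm h ih
    have h10 : m * 10 ≤ curr := by
      have := Int.le_ediv_iff_mul_le (a := m) (b := curr) (c := 10) (by omega)
      omega
    rw [altLoop_unfold curr (m * 10), if_pos h10,
        altLoop_unfold (curr / 10) m, if_pos h, ih]
  · intro m hm h
    have h10 : ¬ m * 10 ≤ curr := by
      have := Int.le_ediv_iff_mul_le (a := m) (b := curr) (c := 10) (by omega)
      omega
    rw [altLoop_unfold curr (m * 10), if_neg h10,
        altLoop_unfold (curr / 10) m, if_neg h]; ring

theorem altLoop_step (curr : Int) (h : 1 ≤ curr) :
    altLoop curr 1 (by omega) = 10 * altLoop (curr / 10) 1 (by omega) := by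
  rw [altLoop_unfold, if_pos h]
  exact altLoop_scale curr 1 (by omega)

-- main invariant: with enough fuel, A's loop decides target ≡ curr modulo
-- the smallest power of 10 exceeding curr (which, as both are in range, is equality)
theorem loop_eq_alt : ∀ (fuel : Nat) (curr target : Int), 0 ≤ curr → curr.toNat < fuel →
    check_concat_loop fuel curr target =
      decide (PySem.Int.mod target (altLoop curr 1 (by omega)) = curr) := by
  intro fuel
  induction fuel with
  | zero => intro curr target h hf; omega
  | succ f ih =>
    intro curr target hc hf
    by_cases h0 : curr = 0
    · subst h0
      rw [show altLoop 0 1 (by omega) = 1 by rw [altLoop_unfold]; norm_num]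
      simp [check_concat_loop]
    · have hc1 : 1 ≤ curr := by omega
      have hdiv : PySem.Int.floordiv curr 10 = curr / 10 :=
        PySem.Int.floordiv_eq_ediv_of_pos (by omega)
      have hdivt : PySem.Int.floordiv target 10 = target / 10 :=
        PySem.Int.floordiv_eq_ediv_of_pos (by omega)
      have hmc : PySem.Int.mod curr 10 = curr % 10 := PySem.Int.mod_eq_emod_of_pos (by omega)
      have hmt : PySem.Int.mod target 10 = target % 10 := PySem.Int.mod_eq_emod_of_pos (by omega)
      have hcd : 0 ≤ curr / 10 := Int.ediv_nonneg hc (by omega)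
      have hlt : curr / 10 < curr := Int.ediv_lt_of_lt_mul (by omega) (by omega)
      have hfl : (curr / 10).toNat < f := by omega
      rw [check_concat_loop, if_pos h0, hmc, hmt, hdiv, hdivt]
      set M := altLoop (curr / 10) 1 (by omega) with hM
      have hMpos := altLoop_pos (curr / 10) 1 (by omega)
      rw [altLoop_step curr hc1, ← hM]
      have hMt : PySem.Int.mod (target / 10) M = (target / 10) % M :=
        PySem.Int.mod_eq_emod_of_pos (by omega)
      have hMT : PySem.Int.mod target (10 * M) = target % (10 * M) :=
        PySem.Int.mod_eq_emod_of_pos (by omega)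
      -- decompose target % (10*M) into last digit and rest
      have hdd : target / 10 / M = target / (10 * M) := Int.ediv_ediv_of_nonneg (by omega)
      have e1 : target % (10 * M) = target % 10 + 10 * ((target / 10) % M) := by
        rw [Int.emod_def target (10 * M), Int.emod_def (target / 10) M,
            Int.emod_def target 10, ← hdd]
        ring
      have e2 : curr = curr % 10 + 10 * (curr / 10) := by omega
      have bt : 0 ≤ target % 10 ∧ target % 10 < 10 :=
        ⟨Int.emod_nonneg _ (by omega), Int.emod_lt_of_pos _ (by omega)⟩
      have bc : 0 ≤ curr % 10 ∧ curr % 10 < 10 :=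
        ⟨Int.emod_nonneg _ (by omega), Int.emod_lt_of_pos _ (by omega)⟩
      have btM : 0 ≤ (target / 10) % M ∧ (target / 10) % M < M :=
        ⟨Int.emod_nonneg _ (by omega), Int.emod_lt_of_pos _ (by omega)⟩
      have bcM : 0 ≤ curr / 10 ∧ curr / 10 < M := ⟨hcd, hMpos.2⟩
      by_cases hd : curr % 10 = target % 10
      · rw [if_pos hd, ih (curr / 10) (target / 10) hcd hfl, hMt, hMT]
        simp only [decide_eq_decide]
        constructor
        · intro hEq; omega
        · intro hEq; omega
      · rw [if_neg hd, hMT]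
        symm
        simp only [decide_eq_false_iff_not]
        intro hEq; omega

-- ===== VERDICT (by name: the statement is the Claim_ definition above) =====
theorem check_concat_spec : Claim_equal_check_concat := by
  intro curr target _ hpre
  unfold Spec_check_concat check_concat check_concat_alt
  exact loop_eq_alt (curr.natAbs + 1) curr target hpre (by omega)
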